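-- pv_equiv track=rewrite | github.com/hung20gg/kg_llm | retrieval/retrieval_tools.py | get_education_list
-- ===== SOURCE A (Python) =====
-- def get_education_list(eduList):
--     ranking = ['high school','undergraduate','certificate','bachelor','diploma','master','phd']
--     min_point = 5
--     for edu in eduList:
--         for i, rank in enumerate(ranking):
--             if rank == edu.lower():
--                 min_point = min(min_point, i)
--     return ranking[min_point:]
-- ===== SOURCE B (Python) =====
-- def get_education_list(eduList):
--     ranking = ['high school','undergraduate','certificate','bachelor','diploma','master','phd']
--     have = {e.lower() for e in eduList}
--     for i in range(5):
--         if ranking[i] in have: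
--             return ranking[i:]
--     return ranking[5:]
-- ===== Notes on version B (the rewrite author's own statement) =====
-- stated objective: faster
-- what changed: B builds a set of lowercased entries once and scans the 7-entry ranking table in priority order with early exit, instead of A's nested scan over every entry computing a running minimum.
import Mathlib
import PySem

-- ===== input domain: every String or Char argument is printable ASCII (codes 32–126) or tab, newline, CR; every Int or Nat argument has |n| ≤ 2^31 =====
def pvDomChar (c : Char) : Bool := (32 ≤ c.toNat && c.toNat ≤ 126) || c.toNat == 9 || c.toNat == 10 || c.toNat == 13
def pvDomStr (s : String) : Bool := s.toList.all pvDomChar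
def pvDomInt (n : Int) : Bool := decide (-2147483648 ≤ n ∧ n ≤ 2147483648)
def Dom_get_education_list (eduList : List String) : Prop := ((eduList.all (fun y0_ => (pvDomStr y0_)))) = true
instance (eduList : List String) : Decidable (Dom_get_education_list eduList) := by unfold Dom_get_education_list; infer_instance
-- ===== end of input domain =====

-- B builds the set of lowercased entries once and scans the fixed ranking table in
-- priority order with early exit, instead of A's nested scan keeping a running minimum.

-- ===== PORT A =====
def get_education_list (eduList : List String) : List String :=
  let ranking : List String := ["high school","undergraduate","certificate","bachelor","diploma","master","phd"]
  let min_point : Int :=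
    eduList.foldl (fun mp edu =>
      (PySem.List.enumerate ranking 0).foldl (fun mp p =>
        if p.2 == PySem.Str.lower edu then min mp p.1 else mp) mp) 5
  PySem.List.slice ranking (some min_point) none

-- ===== PORT B =====
-- the 'for i in range(5): if ranking[i] in have: return ranking[i:]' loop of Source B
def altGo (hv ranking : List String) : List Nat → List String
  | [] => ranking.drop 5
  | i :: rest =>
      if PySem.Set.contains hv (ranking.getD i "") then ranking.drop i
      else altGo hv ranking rest

def get_education_list_alt (eduList : List String) : List String :=
  let ranking : List String := ["high school","undergraduate","certificate","bachelor","diploma","master","phd"]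
  let hv := PySem.Set.ofList (eduList.map PySem.Str.lower)
  altGo hv ranking (List.range 5)

-- ===== PRECONDITION & SPEC =====
def Spec_get_education_list (eduList : List String) (out : List String) : Prop := out = get_education_list_alt eduList
instance (eduList : List String) (out : List String) : Decidable (Spec_get_education_list eduList out) := by unfold Spec_get_education_list; infer_instance

-- ===== CLAIM (what is proved, stated in full; the proofs are below) =====
def Claim_equal_get_education_list : Prop := ∀ (eduList : List String), Dom_get_education_list eduList → Spec_get_education_list eduList (get_education_list eduList)

-- ===== LEMMAS AND PROOFS =====

def RK : List String := ["high school","undergraduate","certificate","bachelor","diploma","master","phd"]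

-- index of a (lowercased) string in the ranking table, 7 if absent
def rIdx (s : String) : Int :=
  if "high school" == s then 0 else if "undergraduate" == s then 1 else
  if "certificate" == s then 2 else if "bachelor" == s then 3 else
  if "diploma" == s then 4 else if "master" == s then 5 else
  if "phd" == s then 6 else 7

set_option maxHeartbeats 2000000 in
lemma inner_eq (s : String) (mp : Int) (h : mp ≤ 7) :
    (PySem.List.enumerate RK 0).foldl (fun mp p =>
        if p.2 == s then min mp p.1 else mp) mp = min mp (rIdx s) := by
  simp only [RK, PySem.List.enumerate_cons, PySem.List.enumerate_nil, List.foldl, rIdx]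
  split_ifs <;> simp_all

def fstep (mp : Int) (e : String) : Int := min mp (rIdx (PySem.Str.lower e))

lemma outer_eq (l : List String) (mp : Int) (h : mp ≤ 7) :
    l.foldl (fun mp edu =>
      (PySem.List.enumerate RK 0).foldl (fun mp p =>
        if p.2 == PySem.Str.lower edu then min mp p.1 else mp) mp) mp
    = l.foldl fstep mp := by
  induction l generalizing mp with
  | nil => rfl
  | cons e t ih =>
      simp only [List.foldl]
      rw [inner_eq _ _ h, ih _ (le_trans (min_le_left _ _) h)]
      rfl

lemma fold_min (l : List String) (a b : Int) :
    l.foldl fstep (min a b) = min a (l.foldl fstep b) := by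
  induction l generalizing a b with
  | nil => rfl
  | cons e t ih =>
      simp only [List.foldl, fstep, min_assoc, ih]

set_option maxHeartbeats 2000000 in
lemma best_char (l : List String) :
    l.foldl fstep 7 =
      if "high school" ∈ l.map PySem.Str.lower then 0 else
      if "undergraduate" ∈ l.map PySem.Str.lower then 1 else
      if "certificate" ∈ l.map PySem.Str.lower then 2 else
      if "bachelor" ∈ l.map PySem.Str.lower then 3 else
      if "diploma" ∈ l.map PySem.Str.lower then 4 else
      if "master" ∈ l.map PySem.Str.lower then 5 else
      if "phd" ∈ l.map PySem.Str.lower then 6 else 7 := by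
  induction l with
  | nil => simp
  | cons e t ih =>
      have h1 : (e :: t).foldl fstep 7 = min (rIdx (PySem.Str.lower e)) (t.foldl fstep 7) := by
        have h2 : fstep 7 e = min (rIdx (PySem.Str.lower e)) 7 := min_comm _ _
        simp only [List.foldl, h2, fold_min]
      rw [h1]
      simp only [List.map_cons, List.mem_cons]
      by_cases hk0 : "high school" = PySem.Str.lower e
      · rw [← hk0, ih]; simp [rIdx]; split_ifs <;> omega
      by_cases hk1 : "undergraduate" = PySem.Str.lower e
      · rw [← hk1, ih]; simp [rIdx]; split_ifs <;> omega
      by_cases hk2 : "certificate" = PySem.Str.lower e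
      · rw [← hk2, ih]; simp [rIdx]; split_ifs <;> omega
      by_cases hk3 : "bachelor" = PySem.Str.lower e
      · rw [← hk3, ih]; simp [rIdx]; split_ifs <;> omega
      by_cases hk4 : "diploma" = PySem.Str.lower e
      · rw [← hk4, ih]; simp [rIdx]; split_ifs <;> omega
      by_cases hk5 : "master" = PySem.Str.lower e
      · rw [← hk5, ih]; simp [rIdx]; split_ifs <;> omega
      by_cases hk6 : "phd" = PySem.Str.lower e
      · rw [← hk6, ih]; simp [rIdx]; split_ifs <;> omega
      · rw [ih]; simp [rIdx, hk0, hk1, hk2, hk3, hk4, hk5, hk6]; split_ifs <;> omega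

lemma hcontains (l : List String) (x : String) :
    PySem.Set.contains (PySem.Set.ofList (l.map PySem.Str.lower)) x
      = decide (x ∈ l.map PySem.Str.lower) := by
  simp [PySem.Set.mem_ofList]

set_option maxHeartbeats 2000000 in
lemma alt_char (l : List String) :
    get_education_list_alt l =
      if "high school" ∈ l.map PySem.Str.lower then RK.drop 0 else
      if "undergraduate" ∈ l.map PySem.Str.lower then RK.drop 1 else
      if "certificate" ∈ l.map PySem.Str.lower then RK.drop 2 else
      if "bachelor" ∈ l.map PySem.Str.lower then RK.drop 3 else
      if "diploma" ∈ l.map PySem.Str.lower then RK.drop 4 else RK.drop 5 := by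
  have hr : List.range 5 = [0,1,2,3,4] := by decide
  have hA : get_education_list_alt l
      = altGo (PySem.Set.ofList (l.map PySem.Str.lower)) RK (List.range 5) := rfl
  rw [hA, hr]
  have g0 : RK.getD 0 "" = "high school" := rfl
  have g1 : RK.getD 1 "" = "undergraduate" := rfl
  have g2 : RK.getD 2 "" = "certificate" := rfl
  have g3 : RK.getD 3 "" = "bachelor" := rfl
  have g4 : RK.getD 4 "" = "diploma" := rfl
  simp only [altGo, g0, g1, g2, g3, g4, hcontains, decide_eq_true_eq]

-- ===== VERDICT (by name: the statement is the Claim_ definition above) =====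
set_option maxHeartbeats 2000000 in
theorem get_education_list_spec : Claim_equal_get_education_list := by
  intro l _
  unfold Spec_get_education_list
  have hA : get_education_list l
      = PySem.List.slice RK (some (l.foldl (fun mp edu =>
          (PySem.List.enumerate RK 0).foldl (fun mp p =>
            if p.2 == PySem.Str.lower edu then min mp p.1 else mp) mp) 5)) none := rfl
  rw [hA, outer_eq l 5 (by norm_num)]
  rw [show (5 : Int) = min 5 7 from rfl, fold_min, best_char, alt_char]
  split_ifs <;> decide
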